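-- pv_equiv track=rewrite | github.com/GizawAAiT/Codeforces | B_Good_Kid.py | max_product_after_increment
-- ===== SOURCE A (Python) =====
-- def max_product_after_increment(digits):
--     """Return the maximal product after adding 1 to exactly one array element."""
--     mn = min(digits)
--     used = False
--     p = 1
--     for v in digits:
--         if not used and v == mn:
--             p *= v + 1
--             used = True
--         else:
--             p *= v
--     return p
-- ===== SOURCE B (Python) =====
-- def max_product_after_increment(digits):
--     """Return the maximal product after adding 1 to exactly one array element."""
--     s = sorted(digits)
--     p = s[0] + 1
--     for v in s[1:]:
--         p *= v
--     return p
-- ===== Notes on version B (the rewrite author's own statement) =====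
-- stated objective: alternative
-- what changed: B sorts the list and multiplies (smallest+1) by the remaining sorted tail, replacing A's fused min-scan with a flag-guarded product loop; correctness rests on commutativity of the product under the sort's permutation.
import Mathlib
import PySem

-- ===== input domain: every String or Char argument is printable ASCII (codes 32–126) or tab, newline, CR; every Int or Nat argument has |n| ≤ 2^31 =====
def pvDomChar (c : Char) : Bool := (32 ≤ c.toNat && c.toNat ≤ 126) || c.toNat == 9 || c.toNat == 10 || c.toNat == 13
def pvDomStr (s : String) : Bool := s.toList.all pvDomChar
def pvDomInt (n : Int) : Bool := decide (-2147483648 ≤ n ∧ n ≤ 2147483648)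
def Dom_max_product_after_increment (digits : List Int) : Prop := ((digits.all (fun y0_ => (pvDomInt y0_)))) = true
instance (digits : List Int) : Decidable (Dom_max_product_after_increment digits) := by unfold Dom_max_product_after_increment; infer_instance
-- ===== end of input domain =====

-- B sorts the list and multiplies (smallest+1) by the sorted tail, instead of A's fused min-scan + flag-guarded product loop (objective: alternative; sorting costs O(n log n)).

-- ===== PORT A =====
-- A: mn = min(digits); one pass with a 'used' flag multiplying v+1 at the first v == mn.
def max_product_after_increment (digits : List Int) : Int :=
  match PySem.List.min? digits (fun x => x) with
  | none => 0   -- unreachable under Pre_: min([]) raises ValueError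
  | some mn =>
    (digits.foldl
      (fun (s : Bool × Int) v =>
        if !s.1 && v == mn then (true, s.2 * (v + 1)) else (s.1, s.2 * v))
      (false, 1)).2

-- ===== PORT B =====
-- B: s = sorted(digits); p = s[0] + 1; then multiply the rest s[1:] in.
def max_product_after_increment_alt (digits : List Int) : Int :=
  match PySem.List.sorted digits (fun x => x) with
  | [] => 0   -- unreachable under Pre_: s[0] raises IndexError on []
  | h :: t => t.foldl (fun p v => p * v) (h + 1)

-- ===== PRECONDITION & SPEC =====
-- Pre_ excludes only the empty list, on which A's min raises ValueError (and B's s[0] raises IndexError).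
def Pre_max_product_after_increment (digits : List Int) : Prop := digits ≠ []
instance (digits : List Int) : Decidable (Pre_max_product_after_increment digits) := by unfold Pre_max_product_after_increment; infer_instance
def pvWitness_max_product_after_increment : List Int := [3, 1, 2]

def Spec_max_product_after_increment (digits : List Int) (out : Int) : Prop := out = max_product_after_increment_alt digits
instance (digits : List Int) (out : Int) : Decidable (Spec_max_product_after_increment digits out) := by unfold Spec_max_product_after_increment; infer_instance

-- ===== CLAIM (what is proved, stated in full; the proofs are below) =====
def Claim_equal_max_product_after_increment : Prop := ∀ (digits : List Int), Dom_max_product_after_increment digits → Pre_max_product_after_increment digits → Spec_max_product_after_increment digits (max_product_after_increment digits)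

-- ===== LEMMAS AND PROOFS =====

-- folding multiplication from seed c is c times the product
theorem foldl_mul_eq (xs : List Int) (c : Int) :
    xs.foldl (fun p v => p * v) c = c * xs.prod := by
  induction xs generalizing c with
  | nil => simp
  | cons x t ih => simp [List.foldl_cons, ih (c * x), List.prod_cons]; ring

-- A's loop while the flag is still false and no element equals mn
theorem foldA_false (mn : Int) (pre : List Int) (p : Int) (h : mn ∉ pre) :
    pre.foldl
      (fun (s : Bool × Int) v =>
        if !s.1 && v == mn then (true, s.2 * (v + 1)) else (s.1, s.2 * v))
      (false, p)
    = (false, p * pre.prod) := by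
  induction pre generalizing p with
  | nil => simp
  | cons x t ih =>
    have hx : x ≠ mn := fun hxe => h (by simp [hxe])
    simp only [List.foldl_cons]
    rw [if_neg (by simp [hx])]
    rw [ih _ (fun hm => h (List.mem_cons_of_mem _ hm))]
    simp [List.prod_cons]; ring

-- A's loop once the flag is true: plain product
theorem foldA_true (mn : Int) (xs : List Int) (p : Int) :
    xs.foldl
      (fun (s : Bool × Int) v =>
        if !s.1 && v == mn then (true, s.2 * (v + 1)) else (s.1, s.2 * v))
      (true, p)
    = (true, p * xs.prod) := by
  induction xs generalizing p with
  | nil => simp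
  | cons x t ih =>
    simp only [List.foldl_cons]
    rw [if_neg (by simp)]
    rw [ih]
    simp [List.prod_cons]; ring

theorem max_product_after_increment_spec : Claim_equal_max_product_after_increment := by
  intro digits _ hpre
  unfold Spec_max_product_after_increment
  unfold max_product_after_increment max_product_after_increment_alt
  obtain ⟨mn, hmn⟩ : ∃ mn, PySem.List.min? digits (fun x => x) = some mn := by
    cases hmin : PySem.List.min? digits (fun x => x) with
    | none => exact absurd ((PySem.List.min?_eq_none_iff _ _).mp hmin) hpre
    | some m => exact ⟨m, rfl⟩
  simp only [hmn]
  have hmem : mn ∈ digits := PySem.List.min?_mem hmn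
  have hmin_le : ∀ y ∈ digits, mn ≤ y := fun y hy => PySem.List.min?_isMin hmn y hy
  -- B's side: sorted is nonempty, its head is mn, its tail is a rearrangement of (digits minus one mn)
  cases hs : PySem.List.sorted digits (fun x => x) with
  | nil => exact absurd ((PySem.List.sorted_eq_nil_iff _ _ _).mp hs) hpre
  | cons h t =>
    have hperm : (h :: t).Perm digits := hs ▸ PySem.List.sorted_perm digits (fun x => x) false
    have hh_mem : h ∈ digits := hperm.mem_iff.mp (by simp)
    have hh_le : ∀ y ∈ digits, h ≤ y := PySem.List.key_head_sorted_le digits (fun x => x) hs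
    have hh : h = mn := le_antisymm (hh_le mn hmem) (hmin_le h hh_mem)
    subst hh
    -- A's side: split at the first occurrence of h
    obtain ⟨i, hi⟩ : ∃ i, PySem.List.index? digits h = some i :=
      ⟨_, (PySem.List.index?_isSome_iff digits h).mpr hmem |> Option.get_mem⟩
    obtain ⟨pre, suf, hsplit, _, hnotin⟩ := (PySem.List.index?_eq_some_iff _ _ _).mp hi
    subst hsplit
    rw [List.foldl_append, foldA_false h pre 1 hnotin]
    simp only [List.foldl_cons]
    rw [if_pos (by simp), foldA_true]
    -- t is a permutation of pre ++ suf
    have hperm2 : t.Perm (pre ++ suf) := by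
      have : (h :: t).Perm (h :: (pre ++ suf)) :=
        hperm.trans (List.perm_middle)
      exact (List.perm_cons h).mp this
    rw [foldl_mul_eq t (h + 1), hperm2.prod_eq]
    simp [List.prod_append]; ring
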